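-- pv_equiv track=rewrite | github.com/ziongh/miller | python/miller/embeddings/search.py | detect_search_method
-- ===== SOURCE A (Python) =====
-- from typing import Literal, Optional
--
-- SearchMethod = Literal["auto", "text", "pattern", "semantic", "hybrid"]
--
-- def detect_search_method(query: str) -> SearchMethod:
--     """
--     Auto-detect optimal search method from query characteristics.
--
--     Detection logic:
--     - If query contains code pattern chars → "pattern"
--     - Otherwise → "hybrid" (best quality for general search)
--
--     Args:
--         query: User's search query
--
--     Returns:
--         Detected search method ("pattern" or "hybrid")
--
--     Examples:
--         >>> detect_search_method(": BaseClass")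
--         "pattern"
--         >>> detect_search_method("ILogger<UserService>")
--         "pattern"
--         >>> detect_search_method("[Fact]")
--         "pattern"
--         >>> detect_search_method("authentication logic")
--         "hybrid"
--     """
--     # Pattern indicators: special chars commonly used in code syntax
--     # Include: inheritance (:), generics (< >), brackets ([ ] ( ) { })
--     # operators (=> ?. &&), and other code-specific symbols
--
--     # Check for multi-char patterns first (to avoid false positives)
--     multi_char_patterns = ["=>", "?.", "&&"]
--     for pattern in multi_char_patterns:
--         if pattern in query:
--             return "pattern"
--
--     # Check for single-char patterns
--     single_char_patterns = [":", "<", ">", "[", "]", "(", ")", "{", "}"]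
--     for ch in single_char_patterns:
--         if ch in query:
--             return "pattern"
--
--     # Default to hybrid for natural language queries
--     return "hybrid"
-- ===== SOURCE B (Python) =====
-- def detect_search_method(query: str) -> str:
--     # Single left-to-right pass with one-character lookahead instead of twelve
--     # full substring scans.  "=>" needs no lookahead: its '>' already triggers.
--     n = len(query)
--     for i, ch in enumerate(query):
--         if ch in ":<>[](){}":
--             return "pattern"
--         if i + 1 < n and ((ch == '?' and query[i + 1] == '.') or
--                           (ch == '&' and query[i + 1] == '&')):
--             return "pattern"
--     return "hybrid"
-- ===== Notes on version B (the rewrite author's own statement) =====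
-- stated objective: alternative
-- what changed: Replaces A's twelve separate full-string substring scans (three multi-char tokens, nine single chars) with a single left-to-right character pass using a one-character lookahead; the arrow token needs no lookahead because its second character already falls in the single-char class.
import Mathlib
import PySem

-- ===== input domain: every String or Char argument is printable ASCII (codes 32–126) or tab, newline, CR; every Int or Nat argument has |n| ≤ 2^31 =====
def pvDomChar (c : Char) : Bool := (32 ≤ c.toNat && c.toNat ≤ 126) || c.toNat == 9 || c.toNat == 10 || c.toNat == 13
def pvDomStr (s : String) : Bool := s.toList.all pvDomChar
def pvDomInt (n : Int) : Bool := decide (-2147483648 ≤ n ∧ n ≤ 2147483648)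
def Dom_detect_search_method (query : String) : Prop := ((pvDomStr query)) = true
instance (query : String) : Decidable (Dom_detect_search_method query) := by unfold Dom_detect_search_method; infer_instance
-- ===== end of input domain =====

-- B replaces A's twelve full substring scans by one left-to-right pass with a
-- one-character lookahead (objective: alternative; single pass over the query).

-- ===== PORT A =====
-- the for-loop with early return: scan the pattern list, True as soon as one is 'in query'
def scanPats : List String → String → Bool
  | [], _ => false
  | p :: ps, q => if PySem.Str.isIn p q then true else scanPats ps q

def detect_search_method (query : String) : String :=
  if scanPats ["=>", "?.", "&&"] query then "pattern"
  else if scanPats [":", "<", ">", "[", "]", "(", ")", "{", "}"] query then "pattern"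
  else "hybrid"

-- ===== PORT B =====
-- one pass: current char plus one-character lookahead (rest.head? = query[i+1])
def detectGo : List Char → String
  | [] => "hybrid"
  | c :: rest =>
    if c ∈ ([':', '<', '>', '[', ']', '(', ')', '{', '}'] : List Char) then "pattern"
    else if (c = '?' ∧ rest.head? = some '.') ∨ (c = '&' ∧ rest.head? = some '&') then "pattern"
    else detectGo rest

def detect_search_method_alt (query : String) : String :=
  detectGo query.toList

-- ===== PRECONDITION & SPEC =====
def Spec_detect_search_method (query : String) (out : String) : Prop := out = detect_search_method_alt query
instance (query : String) (out : String) : Decidable (Spec_detect_search_method query out) := by unfold Spec_detect_search_method; infer_instance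

-- ===== CLAIM (what is proved, stated in full; the proofs are below) =====
def Claim_equal_detect_search_method : Prop := ∀ (query : String), Dom_detect_search_method query → Spec_detect_search_method query (detect_search_method query)

-- ===== LEMMAS AND PROOFS =====

-- B's trigger condition, over the character list
def trigB (cs : List Char) : Prop :=
  (∃ c ∈ ([':', '<', '>', '[', ']', '(', ')', '{', '}'] : List Char), c ∈ cs) ∨
  ['?', '.'] <:+: cs ∨ ['&', '&'] <:+: cs

theorem pair_infix_cons (a b c : Char) (rest : List Char) :
    [a, b] <:+: (c :: rest) ↔ (c = a ∧ rest.head? = some b) ∨ [a, b] <:+: rest := by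
  rw [List.infix_cons_iff]
  cases rest with
  | nil =>
    constructor
    · rintro (h | h)
      · exact absurd h.length_le (by simp)
      · exact absurd h.length_le (by simp)
    · rintro (⟨_, h⟩ | h)
      · exact absurd h (by simp)
      · exact absurd h.length_le (by simp)
  | cons d rest' =>
    simp [List.cons_prefix_cons, eq_comm]

theorem detectGo_pattern (cs : List Char) (ht : trigB cs) : detectGo cs = "pattern" := by
  induction cs with
  | nil =>
    exfalso
    rcases ht with ⟨c, _, hm⟩ | h | h
    · exact absurd hm (List.not_mem_nil)
    · exact absurd h.length_le (by simp)
    · exact absurd h.length_le (by simp)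
  | cons c rest ih =>
    by_cases hc : c ∈ ([':', '<', '>', '[', ']', '(', ')', '{', '}'] : List Char)
    · simp [detectGo, hc]
    · by_cases hp : (c = '?' ∧ rest.head? = some '.') ∨ (c = '&' ∧ rest.head? = some '&')
      · simp [detectGo, hc, hp]
      · have htr : trigB rest := by
          rcases ht with ⟨x, hx, hxin⟩ | h | h
          · rcases List.mem_cons.mp hxin with rfl | hxr
            · exact absurd hx hc
            · exact Or.inl ⟨x, hx, hxr⟩
          · rcases (pair_infix_cons _ _ _ _).mp h with hpair | h'
            · exact absurd (Or.inl hpair) hp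
            · exact Or.inr (Or.inl h')
          · rcases (pair_infix_cons _ _ _ _).mp h with hpair | h'
            · exact absurd (Or.inr hpair) hp
            · exact Or.inr (Or.inr h')
        simp [detectGo, hc, hp, ih htr]

theorem detectGo_hybrid (cs : List Char) (ht : ¬ trigB cs) : detectGo cs = "hybrid" := by
  induction cs with
  | nil => simp [detectGo]
  | cons c rest ih =>
    have hc : c ∉ ([':', '<', '>', '[', ']', '(', ')', '{', '}'] : List Char) :=
      fun h => ht (Or.inl ⟨c, h, List.mem_cons_self⟩)
    have hp : ¬ ((c = '?' ∧ rest.head? = some '.') ∨ (c = '&' ∧ rest.head? = some '&')) := by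
      rintro (⟨h1, h2⟩ | ⟨h1, h2⟩)
      · exact ht (Or.inr (Or.inl ((pair_infix_cons _ _ _ _).mpr (Or.inl ⟨h1, h2⟩))))
      · exact ht (Or.inr (Or.inr ((pair_infix_cons _ _ _ _).mpr (Or.inl ⟨h1, h2⟩))))
    have htr : ¬ trigB rest := by
      rintro (⟨x, hx, hxin⟩ | h | h)
      · exact ht (Or.inl ⟨x, hx, List.mem_cons_of_mem _ hxin⟩)
      · exact ht (Or.inr (Or.inl ((pair_infix_cons _ _ _ _).mpr (Or.inr h))))
      · exact ht (Or.inr (Or.inr ((pair_infix_cons _ _ _ _).mpr (Or.inr h))))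
    simp [detectGo, hc, hp, ih htr]

-- A's result on the same condition: "=>" is absorbed by '>' ∈ cs
theorem detectA_pattern (query : String) (ht : trigB query.toList) :
    detect_search_method query = "pattern" := by
  unfold detect_search_method
  rcases ht with ⟨c, hc, hm⟩ | h | h
  · have es : ∀ (c : Char), c ∈ query.toList →
        PySem.Chars.isIn [c] query.toList = true := by
      intro c hm
      rw [PySem.Chars.isIn_iff_infix, List.singleton_infix_iff]; exact hm
    fin_cases hc <;> simp [scanPats, es _ hm]
  · have hv : PySem.Chars.isIn ['?', '.'] query.toList = true :=
      (PySem.Chars.isIn_iff_infix _ _).mpr h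
    simp [scanPats, hv]
  · have hv : PySem.Chars.isIn ['&', '&'] query.toList = true :=
      (PySem.Chars.isIn_iff_infix _ _).mpr h
    simp [scanPats, hv]

theorem detectA_hybrid (query : String) (ht : ¬ trigB query.toList) :
    detect_search_method query = "hybrid" := by
  unfold detect_search_method
  have h9 : ∀ c ∈ ([':', '<', '>', '[', ']', '(', ')', '{', '}'] : List Char),
      c ∉ query.toList := fun c hc hm => ht (Or.inl ⟨c, hc, hm⟩)
  have e1 : PySem.Chars.isIn ['=', '>'] query.toList = false := by
    rw [Bool.eq_false_iff]; intro h
    exact h9 '>' (by simp)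
      (((PySem.Chars.isIn_iff_infix _ _).mp h).sublist.subset (by simp))
  have e2 : PySem.Chars.isIn ['?', '.'] query.toList = false := by
    rw [Bool.eq_false_iff]; intro h
    exact ht (Or.inr (Or.inl ((PySem.Chars.isIn_iff_infix _ _).mp h)))
  have e3 : PySem.Chars.isIn ['&', '&'] query.toList = false := by
    rw [Bool.eq_false_iff]; intro h
    exact ht (Or.inr (Or.inr ((PySem.Chars.isIn_iff_infix _ _).mp h)))
  have es : ∀ (c : Char), c ∈ ([':', '<', '>', '[', ']', '(', ')', '{', '}'] : List Char) →
      PySem.Chars.isIn [c] query.toList = false := by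
    intro c hc
    rw [Bool.eq_false_iff]; intro h
    exact h9 c hc (by
      have := (PySem.Chars.isIn_iff_infix _ _).mp h
      rw [List.singleton_infix_iff] at this; exact this)
  simp [scanPats, e1, e2, e3, es ':' (by simp), es '<' (by simp),
    es '>' (by simp), es '[' (by simp), es ']' (by simp),
    es '(' (by simp), es ')' (by simp), es '{' (by simp),
    es '}' (by simp)]

-- ===== VERDICT (by name: the statement is the Claim_ definition above) =====
theorem detect_search_method_spec : Claim_equal_detect_search_method := by
  intro query _
  unfold Spec_detect_search_method detect_search_method_alt
  by_cases ht : trigB query.toList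
  · rw [detectA_pattern query ht, detectGo_pattern query.toList ht]
  · rw [detectA_hybrid query ht, detectGo_hybrid query.toList ht]
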